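-- pv_equiv track=rewrite | github.com/sparepillowgit/dlss-updater | services/dlss_version_service.py | format_version_summary
-- ===== SOURCE A (Python) =====
-- from collections import Counter
--
-- def format_version_summary(versions: list[str]) -> str:
--     counts = Counter(versions)
--     parts = []
--
--     for version in sorted(counts.keys()):
--         count = counts[version]
--
--         if count == 1:
--             parts.append(version)
--         else:
--             parts.append(f"{version} x{count}")
--
--     return ", ".join(parts)
-- ===== SOURCE B (Python) =====
-- def format_version_summary(versions: list[str]) -> str:
--     s = sorted(versions)
--     parts = []
--     i = 0
--     n = len(s)
--     while i < n:
--         j = i + 1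
--         while j < n and s[j] == s[i]:
--             j += 1
--         run = j - i
--         parts.append(s[i] if run == 1 else f"{s[i]} x{run}")
--         i = j
--     return ", ".join(parts)
-- ===== Notes on version B (the rewrite author's own statement) =====
-- stated objective: alternative
-- what changed: B drops the Counter/dict entirely: it sorts the whole list once and walks it run by run, taking each version's count from the length of its run of consecutive equal elements.
import Mathlib
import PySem

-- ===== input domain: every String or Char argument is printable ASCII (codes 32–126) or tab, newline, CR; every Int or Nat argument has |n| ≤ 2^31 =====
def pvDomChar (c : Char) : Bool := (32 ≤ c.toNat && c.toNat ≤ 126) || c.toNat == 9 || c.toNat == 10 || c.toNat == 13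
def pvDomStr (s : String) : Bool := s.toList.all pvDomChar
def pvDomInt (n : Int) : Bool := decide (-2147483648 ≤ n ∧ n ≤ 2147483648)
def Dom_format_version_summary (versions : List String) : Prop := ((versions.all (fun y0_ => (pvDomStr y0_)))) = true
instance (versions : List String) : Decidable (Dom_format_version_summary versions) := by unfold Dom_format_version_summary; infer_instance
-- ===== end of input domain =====

-- B replaces the Counter + sorted-distinct-keys loop by one sort of the whole list followed by a
-- run-length walk over consecutive equal elements (objective: alternative structure, same cost).

-- ===== PORT A =====
def format_version_summary (versions : List String) : String :=
  let counts := PySem.Dict.counter versions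
  let parts : List String :=
    (PySem.List.sorted counts.keys (fun k => k) false).foldl
      (fun parts version =>
        let count := counts.getD version 0
        if count == 1 then parts ++ [version]
        else parts ++ [version ++ " x" ++ PySem.Int.toStr count]) []
  PySem.Str.join ", " parts

-- ===== PORT B =====
-- the outer/inner while loops of Source B: scan the run of elements equal to the head (j moves
-- past consecutive equal elements = takeWhile/dropWhile), format it, continue from j
def fvsRuns : List String → List String
  | [] => []
  | x :: xs =>
      let run : Int := 1 + (xs.takeWhile (fun y => y == x)).length
      (if run == 1 then x else x ++ " x" ++ PySem.Int.toStr run)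
        :: fvsRuns (xs.dropWhile (fun y => y == x))
  termination_by l => l.length
  decreasing_by
    simp only [List.length_cons]
    exact Nat.lt_succ_of_le (List.Sublist.length_le (List.dropWhile_sublist _))

def format_version_summary_alt (versions : List String) : String :=
  PySem.Str.join ", " (fvsRuns (PySem.List.sorted versions (fun x => x) false))

-- ===== PRECONDITION & SPEC =====
def Spec_format_version_summary (versions : List String) (out : String) : Prop := out = format_version_summary_alt versions
instance (versions : List String) (out : String) : Decidable (Spec_format_version_summary versions out) := by unfold Spec_format_version_summary; infer_instance

-- ===== CLAIM (what is proved, stated in full; the proofs are below) =====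
def Claim_equal_format_version_summary : Prop := ∀ (versions : List String), Dom_format_version_summary versions → Spec_format_version_summary versions (format_version_summary versions)

-- ===== LEMMAS AND PROOFS =====

-- everything after the first run of a sorted list is strictly greater than its head
lemma drop_gt (x : String) (xs : List String) (h : (x :: xs).Pairwise (· ≤ ·)) :
    ∀ y ∈ xs.dropWhile (fun y => y == x), x < y := by
  intro y hy
  rcases hd : xs.dropWhile (fun y => y == x) with _ | ⟨d0, d'⟩
  · simp [hd] at hy
  · have hne : (fun y => y == x) d0 = false := by
      have := List.head_dropWhile_not (fun y => y == x) (l := xs) (by rw [hd]; simp)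
      simpa [hd] using this
    have hd0ne : d0 ≠ x := by simpa using hne
    have hd0mem : d0 ∈ xs := (List.dropWhile_sublist _).mem (by rw [hd]; simp)
    have hxle : x ≤ d0 := (List.pairwise_cons.mp h).1 d0 hd0mem
    have hxlt : x < d0 := lt_of_le_of_ne hxle (Ne.symm hd0ne)
    rw [hd] at hy
    rcases List.mem_cons.mp hy with rfl | hy'
    · exact hxlt
    · have hpd : (xs.dropWhile (fun y => y == x)).Pairwise (· ≤ ·) :=
        (List.pairwise_cons.mp h).2.sublist (List.dropWhile_sublist _)
      have : d0 ≤ y := by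
        rw [hd] at hpd
        exact (List.pairwise_cons.mp hpd).1 y hy'
      exact lt_of_lt_of_le hxlt this

-- the heads of the runs of a list (proof-side skeleton of fvsRuns)
def runsKeys : List String → List String
  | [] => []
  | x :: xs => x :: runsKeys (xs.dropWhile (fun y => y == x))
  termination_by l => l.length
  decreasing_by
    simp only [List.length_cons]
    exact Nat.lt_succ_of_le (List.Sublist.length_le (List.dropWhile_sublist _))

lemma mem_runsKeys (S : List String) : S.Pairwise (· ≤ ·) → ∀ v, (v ∈ runsKeys S ↔ v ∈ S) := by
  induction S using runsKeys.induct with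
  | case1 => simp [runsKeys]
  | case2 x xs ih =>
    intro hS v
    rw [runsKeys]
    have hd : (xs.dropWhile (fun y => y == x)).Pairwise (· ≤ ·) :=
      (List.pairwise_cons.mp hS).2.sublist (List.dropWhile_sublist _)
    have hxs := List.takeWhile_append_dropWhile (p := fun y => y == x) (l := xs)
    constructor
    · intro hv
      rcases List.mem_cons.mp hv with rfl | hv'
      · exact List.mem_cons_self
      · exact List.mem_cons_of_mem _ ((List.dropWhile_sublist _).mem ((ih hd v).mp hv'))
    · intro hv
      rcases List.mem_cons.mp hv with rfl | hv'
      · exact List.mem_cons_self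
      · rw [← hxs] at hv'
        rcases List.mem_append.mp hv' with ht | hdm
        · have : v = x := by simpa using List.mem_takeWhile_imp ht
          simp [this]
        · exact List.mem_cons_of_mem _ ((ih hd v).mpr hdm)

lemma pairwise_runsKeys (S : List String) : S.Pairwise (· ≤ ·) → (runsKeys S).Pairwise (· < ·) := by
  induction S using runsKeys.induct with
  | case1 => simp [runsKeys]
  | case2 x xs ih =>
    intro hS
    rw [runsKeys]
    have hd : (xs.dropWhile (fun y => y == x)).Pairwise (· ≤ ·) :=
      (List.pairwise_cons.mp hS).2.sublist (List.dropWhile_sublist _)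
    refine List.pairwise_cons.mpr ⟨?_, ih hd⟩
    intro y hy
    exact drop_gt x xs hS y ((mem_runsKeys _ hd y).mp hy)

-- a sorted list counts its head exactly once per element of the leading run
lemma count_head (x : String) (xs : List String) (hS : (x :: xs).Pairwise (· ≤ ·)) :
    (x :: xs).count x = 1 + (xs.takeWhile (fun y => y == x)).length := by
  have hxs := List.takeWhile_append_dropWhile (p := fun y => y == x) (l := xs)
  have ht : (xs.takeWhile (fun y => y == x)).count x = (xs.takeWhile (fun y => y == x)).length :=
    List.count_eq_length.mpr (fun b hb => ((by simpa using (List.mem_takeWhile_imp hb)) : b = x).symm)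
  have hd0 : (xs.dropWhile (fun y => y == x)).count x = 0 :=
    List.count_eq_zero.mpr (fun hmem => lt_irrefl x (drop_gt x xs hS x hmem))
  calc (x :: xs).count x = 1 + xs.count x := by simp; omega
    _ = 1 + ((xs.takeWhile (fun y => y == x)) ++ (xs.dropWhile (fun y => y == x))).count x := by rw [hxs]
    _ = 1 + (xs.takeWhile (fun y => y == x)).length := by rw [List.count_append, ht, hd0]; omega

-- counts of later keys are untouched by dropping the leading run
lemma count_rest (x : String) (xs : List String)
    (v : String) (hv : x < v) :
    (x :: xs).count v = (xs.dropWhile (fun y => y == x)).count v := by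
  have hxs := List.takeWhile_append_dropWhile (p := fun y => y == x) (l := xs)
  have hvx : v ≠ x := ne_of_gt hv
  have ht : (xs.takeWhile (fun y => y == x)).count v = 0 :=
    List.count_eq_zero.mpr (fun hmem => hvx (by simpa using List.mem_takeWhile_imp hmem))
  calc (x :: xs).count v = xs.count v := by simp [Ne.symm hvx]
    _ = ((xs.takeWhile (fun y => y == x)) ++ (xs.dropWhile (fun y => y == x))).count v := by rw [hxs]
    _ = (xs.dropWhile (fun y => y == x)).count v := by rw [List.count_append, ht]; omega

-- B's run walk over a sorted list is A's per-key formatting map over the run heads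
lemma fvsRuns_eq_map (S : List String) : S.Pairwise (· ≤ ·) →
    fvsRuns S = (runsKeys S).map
      (fun v => if ((S.count v : Int)) == 1 then v
                else v ++ " x" ++ PySem.Int.toStr (S.count v : Int)) := by
  induction S using fvsRuns.induct with
  | case1 => simp [fvsRuns, runsKeys]
  | case2 x xs ih =>
    intro hS
    have hd : (xs.dropWhile (fun y => y == x)).Pairwise (· ≤ ·) :=
      (List.pairwise_cons.mp hS).2.sublist (List.dropWhile_sublist _)
    rw [fvsRuns, runsKeys]
    simp only [List.map_cons]
    congr 1
    · have hc := count_head x xs hS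
      have hci : ((x :: xs).count x : Int) = 1 + ((xs.takeWhile (fun y => y == x)).length : Int) := by
        rw [hc]; push_cast; ring
      rw [hci]
    · rw [ih hd]
      apply List.map_congr_left
      intro v hv
      have hvd : v ∈ xs.dropWhile (fun y => y == x) := (mem_runsKeys _ hd v).mp hv
      have hlt : x < v := drop_gt x xs hS v hvd
      rw [count_rest x xs v hlt]

lemma fvs_main (versions : List String) :
    format_version_summary versions = format_version_summary_alt versions := by
  simp only [format_version_summary, format_version_summary_alt]
  have hbody : (fun (parts : List String) version =>
      if (PySem.Dict.counter versions).getD version 0 == 1 then parts ++ [version]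
      else parts ++ [version ++ " x" ++ PySem.Int.toStr ((PySem.Dict.counter versions).getD version 0)])
    = fun parts version => parts ++
        [if ((versions.count version : Int)) == 1 then version
         else version ++ " x" ++ PySem.Int.toStr (versions.count version : Int)] := by
    funext parts version
    simp only [PySem.Dict.getD_counter]
    split <;> rfl
  rw [hbody, PySem.List.foldl_append_singleton_eq_map, List.nil_append,
      PySem.Dict.keys_counter]
  set S := PySem.List.sorted versions (fun x => x) false with hSdef
  have hpair : S.Pairwise (· ≤ ·) := PySem.List.sorted_pairwise versions (fun x => x)
  have hcnt : ∀ v, S.count v = versions.count v :=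
    fun v => (PySem.List.sorted_perm versions (fun x => x) false).count_eq v
  have hkeys : PySem.List.sorted (PySem.Set.ofList versions) (fun k => k) false = runsKeys S := by
    apply PySem.List.sorted_eq_of_perm_of_pairwise_lt
    · refine (List.perm_ext_iff_of_nodup ?_ ?_).mpr ?_
      · exact List.Pairwise.imp (fun h => ne_of_lt h) (pairwise_runsKeys S hpair)
      · exact PySem.Set.nodup_ofList versions
      · intro a
        rw [mem_runsKeys S hpair a, PySem.Set.mem_ofList]
        exact PySem.List.mem_sorted versions (fun x => x) false a
    · exact pairwise_runsKeys S hpair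
  rw [hkeys, fvsRuns_eq_map S hpair]
  congr 1
  apply List.map_congr_left
  intro v _
  rw [hcnt v]

-- ===== VERDICT (by name: the statement is the Claim_ definition above) =====
theorem format_version_summary_spec : Claim_equal_format_version_summary := by
  intro versions _
  exact fvs_main versions
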